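-- pv_equiv track=rewrite | github.com/ArjunMnn/Competitive-Programming | Hackerrank/CyclicBinaryString.py | maximumPower
-- ===== SOURCE A (Python) =====
-- def maximumPower(s):
--     maxc = 0
--     c = 0
--     if s.count('0') == len(s):
--         return -1
--     for i in s:
--         if i == '0':
--             c+=1
--             maxc = max(maxc,c)
--         else:
--             c = 0
--     c = 0
--     for i in range(len(s)):
--         if s[i]=='0':
--             c+=1
--         else:
--             break
--     c1 = 0
--     for i in range(len(s)-1,-1,-1):
--         if s[i] == '0':
--             c1+=1
--         else:
--             break
--
--     return max(maxc,c+c1)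
-- ===== SOURCE B (Python) =====
-- def maximumPower(s):
--     if s.count('0') == len(s):
--         return -1
--     best = 0
--     cur = 0
--     for ch in s + s:
--         if ch == '0':
--             cur += 1
--             if cur > best:
--                 best = cur
--         else:
--             cur = 0
--     return best
-- ===== Notes on version B (the rewrite author's own statement) =====
-- stated objective: simpler
-- what changed: Replaces A's three separate passes (interior run max, leading-zero count, trailing-zero count, then a final max) with one uniform linear scan over the doubled string s+s, which captures the wraparound run at the copy boundary; the all-zeros/-1 guard is kept.
import Mathlib
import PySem

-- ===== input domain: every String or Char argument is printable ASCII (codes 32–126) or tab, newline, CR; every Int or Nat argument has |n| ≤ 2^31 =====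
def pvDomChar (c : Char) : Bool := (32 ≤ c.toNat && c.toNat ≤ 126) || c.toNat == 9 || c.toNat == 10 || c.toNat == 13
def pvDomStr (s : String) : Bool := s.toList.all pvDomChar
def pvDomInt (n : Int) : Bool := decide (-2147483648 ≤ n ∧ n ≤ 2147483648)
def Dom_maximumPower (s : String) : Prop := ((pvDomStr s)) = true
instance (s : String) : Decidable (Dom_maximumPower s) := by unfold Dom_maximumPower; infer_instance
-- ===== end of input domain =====

-- B replaces A's three passes (interior run max, leading zeros, trailing zeros) by one
-- linear scan over the doubled string s+s (objective: simpler); same all-zeros -1 guard.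

-- ===== PORT A =====
-- A's first loop: state (maxc, c), updated exactly as Python does.
def pvStepA (p : Int × Int) (i : Char) : Int × Int :=
  if i = '0' then (max p.1 (p.2 + 1), p.2 + 1) else (p.1, 0)

-- A's second loop ('count zeros from the front, break at the first non-zero');
-- the third loop runs the same scan over the reversed index order.
def pvPrefZeros : List Char → Int
  | [] => 0
  | x :: xs => if x = '0' then 1 + pvPrefZeros xs else 0

def maximumPower (s : String) : Int :=
  if (PySem.Str.count s "0" : Int) = PySem.Str.len s then -1
  else
    let p := s.toList.foldl pvStepA (0, 0)
    let c := pvPrefZeros s.toList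
    let c1 := pvPrefZeros s.toList.reverse
    max p.1 (c + c1)

-- ===== PORT B =====
-- B's single loop: state (best, cur); 's + s' is ported as list append on the code points.
def pvStepB (p : Int × Int) (ch : Char) : Int × Int :=
  if ch = '0' then
    (if p.2 + 1 > p.1 then p.2 + 1 else p.1, p.2 + 1)
  else (p.1, 0)

def maximumPower_alt (s : String) : Int :=
  if (PySem.Str.count s "0" : Int) = PySem.Str.len s then -1
  else ((s.toList ++ s.toList).foldl pvStepB (0, 0)).1

-- ===== PRECONDITION & SPEC =====
def Spec_maximumPower (s : String) (out : Int) : Prop := out = maximumPower_alt s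
instance (s : String) (out : Int) : Decidable (Spec_maximumPower s out) := by unfold Spec_maximumPower; infer_instance

-- ===== CLAIM (what is proved, stated in full; the proofs are below) =====
def Claim_equal_maximumPower : Prop := ∀ (s : String), Dom_maximumPower s → Spec_maximumPower s (maximumPower s)

-- ===== LEMMAS AND PROOFS =====

theorem pvStepB_eq_stepA : pvStepB = pvStepA := by
  funext p ch
  unfold pvStepA pvStepB
  split_ifs with h1 h2 <;> simp_all <;> omega

theorem pvStepA_zero (p : Int × Int) : pvStepA p '0' = (max p.1 (p.2 + 1), p.2 + 1) := by
  simp [pvStepA]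

theorem pvStepA_ne (p : Int × Int) {x : Char} (h : x ≠ '0') : pvStepA p x = (p.1, 0) := by
  simp [pvStepA, h]

theorem pvPrefZeros_cons_zero (xs : List Char) : pvPrefZeros ('0' :: xs) = 1 + pvPrefZeros xs := by
  simp [pvPrefZeros]

theorem pvPrefZeros_cons_ne {x : Char} (xs : List Char) (h : x ≠ '0') :
    pvPrefZeros (x :: xs) = 0 := by
  simp [pvPrefZeros, h]

-- Python's str.count with a one-character needle counts that character.
theorem pvCountGo_singleChar (l : List Char) : ∀ (fuel acc : Nat), l.length ≤ fuel →
    PySem.Chars.count.go ['0'] fuel l acc = acc + l.count '0' := by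
  induction l with
  | nil => intro fuel acc _; cases fuel <;> simp [PySem.Chars.count.go]
  | cons x xs ih =>
    intro fuel acc hf
    cases fuel with
    | zero => simp at hf
    | succ n =>
      have hlen : xs.length ≤ n := by
        simp only [List.length_cons] at hf
        omega
      simp only [PySem.Chars.count.go, List.isPrefixOf, Bool.and_true]
      by_cases hx : '0' = x
      · subst hx
        simp only [beq_self_eq_true, if_pos]
        have hd : List.drop ['0'].length ('0' :: xs) = xs := rfl
        rw [hd, ih n (acc + 1) hlen]
        have hcc : ('0' :: xs).count '0' = xs.count '0' + 1 := by
          simp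
        rw [hcc]
        omega
      · have hb : ('0' == x) = false := by simpa using hx
        rw [hb]
        simp only [Bool.false_eq_true, if_false]
        rw [ih n acc hlen]
        have hcc : (x :: xs).count '0' = xs.count '0' := by
          simp [List.count_cons]
          intro h
          exact absurd h.symm hx
        rw [hcc]

theorem pvCount_singleChar (l : List Char) : PySem.Chars.count l ['0'] = l.count '0' := by
  unfold PySem.Chars.count
  rw [if_neg (by simp), pvCountGo_singleChar l l.length 0 le_rfl]
  omega

-- The max component starting from (m, c) is m ⊔ the max component starting from (0, c);
-- the run counter does not depend on m.
theorem pvFoldA_shift (l : List Char) : ∀ (m c : Int), 0 ≤ m → 0 ≤ c →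
    l.foldl pvStepA (m, c) = (max m (l.foldl pvStepA (0, c)).1, (l.foldl pvStepA (0, c)).2) := by
  induction l with
  | nil =>
    intro m c hm _
    simp only [List.foldl_nil]
    rw [show max m (0 : Int) = m by omega]
  | cons x xs ih =>
    intro m c hm hc
    by_cases hx : x = '0'
    · subst hx
      simp only [List.foldl_cons, pvStepA_zero]
      rw [ih (max m (c + 1)) (c + 1) (by omega) (by omega),
          ih (max 0 (c + 1)) (c + 1) (by omega) (by omega)]
      simp only [Prod.mk.injEq]
      exact ⟨by omega, trivial⟩
    · simp only [List.foldl_cons, pvStepA_ne _ hx]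
      exact ih m 0 hm le_rfl

-- Invariant: counter and max stay non-negative and counter ≤ max.
theorem pvFoldA_inv (l : List Char) : ∀ (m c : Int), 0 ≤ c → c ≤ m →
    0 ≤ (l.foldl pvStepA (m, c)).2 ∧ (l.foldl pvStepA (m, c)).2 ≤ (l.foldl pvStepA (m, c)).1 := by
  induction l with
  | nil => intro m c hc hcm; simpa using ⟨hc, hcm⟩
  | cons x xs ih =>
    intro m c hc hcm
    by_cases hx : x = '0'
    · subst hx
      simp only [List.foldl_cons, pvStepA_zero]
      exact ih (max m (c + 1)) (c + 1) (by omega) (by omega)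
    · simp only [List.foldl_cons, pvStepA_ne _ hx]
      exact ih m 0 le_rfl (by omega)

-- If l contains a non-'0', the final counter is the number of trailing zeros.
theorem pvFoldA_suffix (l : List Char) (hnz : ∃ x ∈ l, x ≠ '0') : ∀ (m c : Int),
    (l.foldl pvStepA (m, c)).2 = pvPrefZeros l.reverse := by
  induction l using List.reverseRecOn with
  | nil => simp at hnz
  | append_singleton ys y ih =>
    intro m c
    rw [List.foldl_append, List.reverse_append]
    simp only [List.reverse_cons, List.reverse_nil, List.nil_append, List.singleton_append,
      List.foldl_cons, List.foldl_nil]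
    by_cases hy : y = '0'
    · subst hy
      have hys : ∃ x ∈ ys, x ≠ '0' := by
        rcases hnz with ⟨x, hx, hne⟩
        rcases List.mem_append.1 hx with h | h
        · exact ⟨x, h, hne⟩
        · simp at h; exact absurd h hne
      rw [pvStepA_zero, pvPrefZeros_cons_zero, ih hys m c]
      omega
    · rw [pvStepA_ne _ hy, pvPrefZeros_cons_ne _ hy]

theorem pvPrefZeros_nonneg (l : List Char) : 0 ≤ pvPrefZeros l := by
  induction l with
  | nil => simp [pvPrefZeros]
  | cons x xs ih => by_cases hx : x = '0' <;> simp [pvPrefZeros, hx] <;> omega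

-- Starting the scan with a pending run of c zeros: if l starts with at least one zero the
-- recorded max gains the joined run c + pvPrefZeros l, otherwise nothing changes.
theorem pvFoldA_pending (l : List Char) : ∀ (c : Int), 0 ≤ c → (∃ x ∈ l, x ≠ '0') →
    (l.foldl pvStepA (0, c)).1 =
      if 0 < pvPrefZeros l then max (c + pvPrefZeros l) ((l.foldl pvStepA (0, 0)).1)
      else (l.foldl pvStepA (0, 0)).1 := by
  induction l with
  | nil => intro c _ hnz; simp at hnz
  | cons x xs ih =>
    intro c hc hnz
    by_cases hx : x = '0'
    · subst hx
      have hys : ∃ x ∈ xs, x ≠ '0' := by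
        rcases hnz with ⟨z, hz, hne⟩
        rcases List.mem_cons.1 hz with h | h
        · exact absurd h hne
        · exact ⟨z, h, hne⟩
      have hP := pvPrefZeros_nonneg xs
      have hM := (pvFoldA_inv xs 0 0 le_rfl le_rfl).2
      have hM0 := (pvFoldA_inv xs 0 0 le_rfl le_rfl).1
      simp only [List.foldl_cons, pvStepA_zero, pvPrefZeros_cons_zero]
      rw [show (max (0 : Int) ((0 : Int) + 1)) = ((0 : Int) + 1) by omega,
          show (max (0 : Int) (c + 1)) = (c + 1) by omega]
      rw [pvFoldA_shift xs (c + 1) (c + 1) (by omega) (by omega),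
          pvFoldA_shift xs (0 + 1) (0 + 1) (by omega) (by omega)]
      rw [ih (c + 1) (by omega) hys, ih (0 + 1) (by omega) hys]
      dsimp only
      split_ifs <;> omega
    · simp only [List.foldl_cons, pvStepA_ne _ hx, pvPrefZeros_cons_ne _ hx]
      simp

-- ===== VERDICT (by name: the statement is the Claim_ definition above) =====
theorem maximumPower_spec : Claim_equal_maximumPower := by
  intro s _
  unfold Spec_maximumPower maximumPower maximumPower_alt
  by_cases hguard : (PySem.Str.count s "0" : Int) = PySem.Str.len s
  · rw [if_pos hguard, if_pos hguard]
  · rw [if_neg hguard, if_neg hguard]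
    have hnz : ∃ x ∈ s.toList, x ≠ '0' := by
      rw [PySem.Str.count_eq, PySem.Str.len_eq] at hguard
      have hc : PySem.Chars.count s.toList ("0").toList = s.toList.count '0' := by
        have h0 : ("0").toList = ['0'] := rfl
        rw [h0]; exact pvCount_singleChar s.toList
      rw [hc] at hguard
      have hne : s.toList.count '0' ≠ s.toList.length := fun h => hguard (by exact_mod_cast h)
      by_contra hcon
      push Not at hcon
      exact hne (List.count_eq_length.2 fun b hb => ((hcon b hb).symm))
    set l := s.toList with hl
    rw [pvStepB_eq_stepA, List.foldl_append]
    have hinv := pvFoldA_inv l 0 0 le_rfl le_rfl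
    have hsuf := pvFoldA_suffix l hnz 0 0
    have hP := pvPrefZeros_nonneg l
    set F := l.foldl pvStepA (0, 0) with hF
    have h1 : l.foldl pvStepA F =
        (max F.1 ((l.foldl pvStepA (0, F.2)).1), (l.foldl pvStepA (0, F.2)).2) := by
      have h := pvFoldA_shift l F.1 F.2 (le_trans hinv.1 hinv.2) hinv.1
      rwa [Prod.mk.eta] at h
    have h2 := pvFoldA_pending l F.2 hinv.1 hnz
    rw [h1]
    simp only
    rw [h2, ← hsuf, ← hF]
    split_ifs with hp
    · omega
    · have h0 : pvPrefZeros l = 0 := by omega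
      rw [h0]
      omega
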